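-- pv_equiv track=rewrite | github.com/XertroV/tasks | backlog/commands/schema.py | _parse_only_tokens
-- ===== SOURCE A (Python) =====
-- def _parse_only_tokens(raw_only: tuple[str, ...]) -> list[str]:
--     """Parse --only values (supports repeated flag and comma-separated lists)."""
--     tokens = []
--     for raw in raw_only:
--         if not raw:
--             continue
--         parts = [part.strip() for part in raw.split(",")]
--         tokens.extend([part for part in parts if part])
--     return tokens
-- ===== SOURCE B (Python) =====
-- def _flush(piece, tokens):
--     """Trim whitespace off both ends of the buffered chars; append if non-empty."""
--     i, j = 0, len(piece)
--     while i < j and piece[i].isspace():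
--         i += 1
--     while j > i and piece[j - 1].isspace():
--         j -= 1
--     if i < j:
--         tokens.append("".join(piece[i:j]))
--
--
-- def _parse_only_tokens(raw_only):
--     """Parse --only values with a character-level scanner: no split/strip calls."""
--     tokens = []
--     for raw in raw_only:
--         piece = []
--         for ch in raw:
--             if ch == ",":
--                 _flush(piece, tokens)
--                 piece = []
--             else:
--                 piece.append(ch)
--         _flush(piece, tokens)
--     return tokens
-- ===== Notes on version B (the rewrite author's own statement) =====
-- stated objective: alternative
-- what changed: B replaces A's split(',')/strip() library pipeline with an explicit character-level state machine: one scan over the characters with a piece buffer, flushing a manually-trimmed token at each comma and at end of string.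
import Mathlib
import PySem

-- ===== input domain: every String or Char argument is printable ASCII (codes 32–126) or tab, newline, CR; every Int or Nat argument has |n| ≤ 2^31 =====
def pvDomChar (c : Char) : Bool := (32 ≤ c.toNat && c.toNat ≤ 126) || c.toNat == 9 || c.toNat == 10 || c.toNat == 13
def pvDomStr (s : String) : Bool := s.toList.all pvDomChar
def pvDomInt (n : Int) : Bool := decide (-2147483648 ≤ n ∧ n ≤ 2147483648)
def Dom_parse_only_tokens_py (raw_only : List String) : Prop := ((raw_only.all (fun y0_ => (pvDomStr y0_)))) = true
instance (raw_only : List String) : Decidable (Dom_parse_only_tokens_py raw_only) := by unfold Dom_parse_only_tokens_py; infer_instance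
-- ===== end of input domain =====

-- B replaces A's split/strip library pipeline by an explicit character-level scanner with a piece buffer (objective: alternative).

-- ===== PORT A =====
-- literal port of A: loop over raw_only, skip empty strings, split each on ",", strip, keep non-empty
def parse_only_tokens_py (raw_only : List String) : List String :=
  raw_only.foldl
    (fun tokens raw =>
      if raw = "" then tokens
      else
        let parts := ((PySem.Str.split? raw ",").getD []).map PySem.Str.strip
        tokens ++ parts.filter (fun p => p ≠ ""))
    []

-- ===== PORT B =====
-- Source B's left-trim while loop ('i += 1 while piece[i].isspace()'), ported as structural recursion; exact
def bTrimL : List Char → List Char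
  | [] => []
  | c :: rest => if PySem.Chars.isspace c then bTrimL rest else c :: rest

-- Source B's right-trim while loop ('j -= 1 while piece[j-1].isspace()'), ported via reversal; exact
def bTrimR (cs : List Char) : List Char := (bTrimL cs.reverse).reverse

-- Source B's _flush: trim both ends, append the joined piece if non-empty
def bFlush (piece : List Char) (tokens : List String) : List String :=
  let t := bTrimR (bTrimL piece)
  if t = [] then tokens else tokens ++ [String.ofList t]

-- Source B's inner character loop over one raw string
def bScan : List Char → List Char → List String → List String
  | [], piece, tokens => bFlush piece tokens
  | c :: rest, piece, tokens =>
      if c = ',' then bScan rest [] (bFlush piece tokens)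
      else bScan rest (piece ++ [c]) tokens

-- literal port of B: character scanner, flushing a trimmed token at each comma and at end of string
def parse_only_tokens_py_alt (raw_only : List String) : List String :=
  raw_only.foldl (fun tokens raw => bScan raw.toList [] tokens) []

-- ===== PRECONDITION & SPEC =====
def Spec_parse_only_tokens_py (raw_only : List String) (out : List String) : Prop := out = parse_only_tokens_py_alt raw_only
instance (raw_only : List String) (out : List String) : Decidable (Spec_parse_only_tokens_py raw_only out) := by unfold Spec_parse_only_tokens_py; infer_instance

-- ===== CLAIM (what is proved, stated in full; the proofs are below) =====
def Claim_equal_parse_only_tokens_py : Prop := ∀ (raw_only : List String), Dom_parse_only_tokens_py raw_only → Spec_parse_only_tokens_py raw_only (parse_only_tokens_py raw_only)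

-- ===== LEMMAS AND PROOFS =====

-- a structural single-character splitter, the spec of PySem.Chars.splitOn for sep = [',']
def split1 : List Char → List (List Char)
  | [] => [[]]
  | c :: rest => if c = ',' then [] :: split1 rest else (split1 rest).modifyHead (c :: ·)

theorem split1_ne_nil (cs : List Char) : split1 cs ≠ [] := by
  induction cs with
  | nil => simp [split1]
  | cons c rest ih =>
    simp only [split1]
    split
    · simp
    · cases h : split1 rest with
      | nil => exact absurd h ih
      | cons p ps => simp

theorem go_spec (fuel : Nat) (l cur : List Char) (acc : List (List Char))
    (h : l.length < fuel) :
    PySem.Chars.splitOn.go [','] fuel l cur acc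
      = acc.reverse ++ (split1 l).modifyHead (cur.reverse ++ ·) := by
  induction fuel generalizing l cur acc with
  | zero => omega
  | succ fuel ih =>
    rw [PySem.Chars.splitOn.go.eq_def]
    cases l with
    | nil => simp [split1]
    | cons c rest =>
      simp only []
      by_cases hc : c = ','
      · subst hc
        have hp : List.isPrefixOf [','] (',' :: rest) = true := by
          simp [List.isPrefixOf]
        simp only [hp, if_true, List.length_cons, List.drop_succ_cons, List.length_nil,
          List.drop_zero]
        rw [ih rest [] (cur.reverse :: acc) (by simpa using Nat.lt_of_succ_lt_succ h)]
        simp only [split1, if_true, List.modifyHead]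
        cases hs : split1 rest with
        | nil => exact absurd hs (split1_ne_nil rest)
        | cons p ps => simp
      · have hp : List.isPrefixOf [','] (c :: rest) = false := by
          simp [List.isPrefixOf]
          exact fun h => absurd h.symm hc
        simp only [hp, if_false, Bool.false_eq_true]
        rw [ih rest (c :: cur) acc (by simpa using Nat.lt_of_succ_lt_succ h)]
        simp only [split1, if_neg hc]
        cases hs : split1 rest with
        | nil => exact absurd hs (split1_ne_nil rest)
        | cons p ps => simp

theorem splitOn_comma (cs : List Char) : PySem.Chars.splitOn cs [','] = split1 cs := by
  unfold PySem.Chars.splitOn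
  rw [go_spec cs.length.succ cs [] [] (Nat.lt_succ_self _)]
  simp
  cases h : split1 cs with
  | nil => exact absurd h (split1_ne_nil cs)
  | cons p ps => simp

theorem split1_append (s t : List Char) :
    split1 (s ++ ',' :: t) = split1 s ++ split1 t := by
  induction s with
  | nil => simp [split1]
  | cons c s ih =>
    simp only [List.cons_append, split1, ih]
    split
    · simp
    · cases h : split1 s with
      | nil => exact absurd h (split1_ne_nil s)
      | cons p ps => simp

-- chars-level token extraction: split on ',', strip, keep non-empty
def tokC (cs : List Char) : List (List Char) :=
  ((split1 cs).map PySem.Chars.strip).filter (fun p => p ≠ [])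

theorem tokC_nil : tokC [] = [] := by decide

theorem tokC_append (s t : List Char) : tokC (s ++ ',' :: t) = tokC s ++ tokC t := by
  simp [tokC, split1_append]

-- the string-level per-piece pipeline equals tokC mapped back through ofList
theorem ofList_ne_empty (c : Char) (t : List Char) : String.ofList (c :: t) ≠ "" := by
  intro h
  have := congrArg String.toList h
  simp at this

theorem strip_ofList (p : List Char) :
    PySem.Str.strip (String.ofList p) = String.ofList (PySem.Chars.strip p) := by
  apply String.toList_injective
  simp [PySem.Str.toList_strip]

theorem strTok_list (ps : List (List Char)) :
    ((ps.map String.ofList).map PySem.Str.strip).filter (fun p => p ≠ "")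
      = ((ps.map PySem.Chars.strip).filter (fun p => p ≠ [])).map String.ofList := by
  induction ps with
  | nil => simp
  | cons p ps ih =>
    simp only [List.map_cons, List.filter_cons, strip_ofList]
    rcases h : PySem.Chars.strip p with _ | ⟨c, t⟩
    · simpa using ih
    · rw [if_pos (by simp only [ne_eq, decide_not]; simp [ofList_ne_empty c t]), if_pos (by simp)]
      simpa using ih

theorem strTok (cs : List Char) :
    (((PySem.Chars.splitOn cs [',']).map String.ofList).map PySem.Str.strip).filter
        (fun p => p ≠ "")
      = (tokC cs).map String.ofList := by
  rw [splitOn_comma, strTok_list]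
  rfl

theorem split_resolve (s : String) :
    (PySem.Str.split? s ",").getD [] = (PySem.Chars.splitOn s.toList [',']).map String.ofList := by
  have h := PySem.Str.split?_map s ","
  unfold PySem.Str.split? at *
  simp [PySem.Chars.split?] at *

theorem A_flatMap (l : List String) (acc : List String) :
    l.foldl
      (fun tokens raw =>
        if raw = "" then tokens
        else
          let parts := ((PySem.Str.split? raw ",").getD []).map PySem.Str.strip
          tokens ++ parts.filter (fun p => p ≠ ""))
      acc
      = acc ++ l.flatMap (fun s => (tokC s.toList).map String.ofList) := by
  induction l generalizing acc with
  | nil => simp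
  | cons x xs ih =>
    simp only [List.foldl_cons, List.flatMap_cons]
    by_cases hx : x = ""
    · subst hx
      rw [ih]
      simp [tokC_nil]
    · simp only [if_neg hx]
      rw [ih, split_resolve, strTok]
      simp

-- ===== B-side lemmas =====

theorem bTrimL_eq_dropWhile (cs : List Char) :
    bTrimL cs = cs.dropWhile PySem.Chars.isspace := by
  induction cs with
  | nil => rfl
  | cons c rest ih =>
    simp only [bTrimL, List.dropWhile]
    by_cases h : PySem.Chars.isspace c <;> simp [h, ih]

theorem bTrim_eq_strip (cs : List Char) :
    bTrimR (bTrimL cs) = PySem.Chars.strip cs := by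
  simp [bTrimR, bTrimL_eq_dropWhile, PySem.Chars.strip, PySem.Chars.lstrip, PySem.Chars.rstrip]

theorem split1_comma_free (piece : List Char) (h : ',' ∉ piece) :
    split1 piece = [piece] := by
  induction piece with
  | nil => rfl
  | cons c rest ih =>
    simp only [List.mem_cons, not_or] at h
    simp only [split1, if_neg (Ne.symm h.1), ih h.2, List.modifyHead]

theorem bFlush_tokC (piece : List Char) (tokens : List String) (h : ',' ∉ piece) :
    bFlush piece tokens = tokens ++ (tokC piece).map String.ofList := by
  simp only [bFlush, bTrim_eq_strip, tokC, split1_comma_free piece h, List.map_cons,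
    List.map_nil, List.filter]
  rcases hs : PySem.Chars.strip piece with _ | ⟨c, t⟩
  · simp
  · simp

theorem bScan_tokC (l piece : List Char) (tokens : List String) (h : ',' ∉ piece) :
    bScan l piece tokens = tokens ++ (tokC (piece ++ l)).map String.ofList := by
  induction l generalizing piece tokens with
  | nil => simpa using bFlush_tokC piece tokens h
  | cons c rest ih =>
    simp only [bScan]
    by_cases hc : c = ','
    · subst hc
      rw [if_pos rfl, ih [] (bFlush piece tokens) (by simp), tokC_append,
        bFlush_tokC piece tokens h]
      simp
    · rw [if_neg hc, ih (piece ++ [c]) tokens (by simp [h, Ne.symm hc]),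
        List.append_assoc]
      rfl

theorem B_flatMap (l : List String) (acc : List String) :
    l.foldl (fun tokens raw => bScan raw.toList [] tokens) acc
      = acc ++ l.flatMap (fun s => (tokC s.toList).map String.ofList) := by
  induction l generalizing acc with
  | nil => simp
  | cons x xs ih =>
    simp only [List.foldl_cons, List.flatMap_cons]
    rw [bScan_tokC x.toList [] acc (by simp), ih]
    simp

-- ===== VERDICT (by name: the statement is the Claim_ definition above) =====
theorem parse_only_tokens_py_spec : Claim_equal_parse_only_tokens_py := by
  intro raw_only _
  unfold Spec_parse_only_tokens_py parse_only_tokens_py parse_only_tokens_py_alt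
  rw [A_flatMap raw_only [], B_flatMap raw_only []]
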